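-- pv_equiv track=rewrite | github.com/mdarud/Tugas4Kripto | utils.py | int_to_str
-- ===== SOURCE A (Python) =====
-- def int_to_str(m):
--     _m = str(m)
--     _m = "0" * ((3 - (len(_m) % 3)) if len(_m) % 3 > 0 else 0) + _m
--     x = ""
--     for i in range(0, len(_m), 3):
--         c = chr(int(_m[i:i+3]))
--         x += c
--     return x
-- ===== SOURCE B (Python) =====
-- def int_to_str(m):
--     s = str(m)
--     parts = []
--     i = len(s)
--     while i > 0:
--         parts.append(chr(int(s[max(0, i - 3):i])))
--         i -= 3
--     return ''.join(reversed(parts))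
-- ===== Notes on version B (the rewrite author's own statement) =====
-- stated objective: simpler
-- what changed: Instead of left-padding the digit string with zeros to a whole number of three-digit groups and scanning it left-to-right by index, B scans the unpadded digit string from the right in three-digit chunks (int() ignores leading zeros, so the leftmost short chunk decodes identically), collecting characters and reversing at the end.
-- outside the precondition, e.g. on int_to_str(-5): A raises ValueError, B raises ValueError
import Mathlib
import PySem

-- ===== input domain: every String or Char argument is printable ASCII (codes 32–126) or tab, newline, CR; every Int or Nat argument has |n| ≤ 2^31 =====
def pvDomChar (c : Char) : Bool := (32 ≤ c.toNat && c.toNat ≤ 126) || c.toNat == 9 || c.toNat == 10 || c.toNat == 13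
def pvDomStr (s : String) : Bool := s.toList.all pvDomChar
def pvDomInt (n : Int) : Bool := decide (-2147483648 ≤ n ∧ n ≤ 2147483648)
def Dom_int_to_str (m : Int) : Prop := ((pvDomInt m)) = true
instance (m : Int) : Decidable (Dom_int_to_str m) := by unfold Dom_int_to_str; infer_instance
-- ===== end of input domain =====

-- B scans the digit string from the RIGHT in three-digit chunks and reverses at the end, dropping A's
-- padding computation (int() ignores leading zeros); objective: simpler.

-- ===== PORT A =====
-- chr(v): hand port, exact for 0 ≤ v < 0x110000 (every chunk value reached under Pre_ is 0..999)
def pyChr (v : Int) : Char := Char.ofNat v.toNat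
-- int(s): PySem.Int.ofChars? never returns none on the digit chunks reached under Pre_
def pyIntD (cs : List Char) : Int := (PySem.Int.ofChars? cs).getD 0

def int_to_str (m : Int) : String :=
  let m0 := PySem.Int.toChars m                      -- _m = str(m)
  -- len(_m) % 3 computed on the nonnegative length: Nat arithmetic is exact here
  let pad : Nat := if m0.length % 3 > 0 then 3 - m0.length % 3 else 0
  let t := List.replicate pad '0' ++ m0              -- "0" * pad + _m
  String.mk ((PySem.List.pyRange 0 (PySem.List.len t) 3).foldl
    (fun x i => x ++ [pyChr (pyIntD (PySem.List.slice t (some i) (some (i + 3))))]) [])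

-- ===== PORT B =====
-- while i > 0: parts.append(chr(int(s[max(0, i-3):i]))); i -= 3
def bChunks (s : List Char) (i : Nat) (parts : List Char) : List Char :=
  if i > 0 then
    bChunks s (i - 3)
      (parts ++ [pyChr (pyIntD (PySem.List.slice s (some (max 0 ((i : Int) - 3))) (some (i : Int))))])
  else parts
  termination_by i
  decreasing_by omega

def int_to_str_alt (m : Int) : String :=
  let s := PySem.Int.toChars m
  String.mk (bChunks s s.length []).reverse          -- ''.join(reversed(parts))

-- ===== PRECONDITION & SPEC =====
-- Pre_ excludes negative m, on which A raises ValueError (int() on a chunk containing '-').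
def Pre_int_to_str (m : Int) : Prop := 0 ≤ m
instance (m : Int) : Decidable (Pre_int_to_str m) := by unfold Pre_int_to_str; infer_instance
def pvWitness_int_to_str : Int := (12345)
def Spec_int_to_str (m : Int) (out : String) : Prop := out = int_to_str_alt m
instance (m : Int) (out : String) : Decidable (Spec_int_to_str m out) := by unfold Spec_int_to_str; infer_instance

-- ===== CLAIM (what is proved, stated in full; the proofs are below) =====
def Claim_equal_int_to_str : Prop := ∀ (m : Int), Dom_int_to_str m → Pre_int_to_str m → Spec_int_to_str m (int_to_str m)

-- ===== LEMMAS AND PROOFS =====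

-- the ten decimal digit characters
def DIG : List Char := ['0','1','2','3','4','5','6','7','8','9']

-- decode one chunk: chr(int(cs))
def gconv (cs : List Char) : Char := pyChr (pyIntD cs)

-- A's padding amount, and A's padded digit string
def padOf (n : Nat) : Nat := if n % 3 > 0 then 3 - n % 3 else 0
def pads (ds : List Char) : List Char := List.replicate (padOf ds.length) '0' ++ ds

-- common reference: decode three-digit chunks from the right, output left-to-right
def Rlist (ds : List Char) : List Char :=
  if ds = [] then [] else
    Rlist (ds.take (ds.length - 3)) ++ [gconv (ds.drop (ds.length - 3))]
  termination_by ds.length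
  decreasing_by
    simp only [List.length_take]
    have : 0 < ds.length := List.length_pos_iff.mpr (by assumption)
    omega

-- A's fold over pyRange 0 L 3, after `pyRange_of_pos` turns the range into a mapped List.range
def AfoldR (t : List Char) (k : Nat) : List Char :=
  ((List.range k).map (fun (j : Nat) => (0 : Int) + 3 * (j : Int))).foldl
    (fun x i => x ++ [pyChr (pyIntD (PySem.List.slice t (some i) (some (i + 3))))]) []

-- ---- digit facts about str(m) ----

theorem digitChar_mem_DIG (d : Nat) (h : d < 10) : d.digitChar ∈ DIG := by
  interval_cases d <;> decide

theorem toDigitsCore_mem (f : Nat) : ∀ (n : Nat) (ds : List Char),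
    (∀ c ∈ ds, c ∈ DIG) → ∀ c ∈ Nat.toDigitsCore 10 f n ds, c ∈ DIG := by
  induction f with
  | zero => intro n ds h c hc; simp only [Nat.toDigitsCore] at hc; exact h c hc
  | succ f ih =>
    intro n ds h c hc
    simp only [Nat.toDigitsCore] at hc
    split at hc
    · rw [List.mem_cons] at hc
      rcases hc with h1 | h2
      · exact h1 ▸ digitChar_mem_DIG _ (Nat.mod_lt _ (by omega))
      · exact h c h2
    · exact ih _ _ (by
        intro c hc; rw [List.mem_cons] at hc; rcases hc with h1 | h2
        · exact h1 ▸ digitChar_mem_DIG _ (Nat.mod_lt _ (by omega))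
        · exact h c h2) c hc

theorem toDigitsCore_len (f : Nat) : ∀ (n : Nat) (ds : List Char),
    ds.length ≤ (Nat.toDigitsCore 10 f n ds).length := by
  induction f with
  | zero => intro n ds; simp [Nat.toDigitsCore]
  | succ f ih =>
    intro n ds
    simp only [Nat.toDigitsCore]
    split
    · simp
    · exact le_trans (by simp) (ih (n / 10) (_ :: ds))

theorem toChars_mem (m : Int) (hm : 0 ≤ m) : ∀ c ∈ PySem.Int.toChars m, c ∈ DIG := by
  intro c hc
  simp only [PySem.Int.toChars, if_neg (by omega : ¬ m < 0)] at hc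
  exact toDigitsCore_mem _ _ _ (by simp) c hc

theorem toChars_ne_nil (m : Int) (hm : 0 ≤ m) : PySem.Int.toChars m ≠ [] := by
  simp only [PySem.Int.toChars, if_neg (by omega : ¬ m < 0), Nat.toDigits]
  intro h
  have h2 := toDigitsCore_len m.toNat (m.toNat / 10) [(m.toNat % 10).digitChar]
  simp only [Nat.toDigitsCore] at h
  split at h
  · exact absurd h (by simp)
  · rw [h] at h2; simp at h2

-- ---- int() ignores leading zeros on short digit chunks ----

theorem star1 (a : Char) (ha : a ∈ DIG) : pyIntD ['0', '0', a] = pyIntD [a] := by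
  fin_cases ha <;> decide

theorem star2 (a b : Char) (ha : a ∈ DIG) (hb : b ∈ DIG) :
    pyIntD ['0', a, b] = pyIntD [a, b] := by
  fin_cases ha <;> fin_cases hb <;> decide

theorem g_pad (ds : List Char) (h1 : ds ≠ []) (hd : ∀ c ∈ ds, c ∈ DIG) (h3 : ds.length ≤ 3) :
    gconv (List.replicate (padOf ds.length) '0' ++ ds) = gconv ds := by
  match ds with
  | [a] =>
    show gconv ['0', '0', a] = gconv [a]
    simp only [gconv, star1 a (hd a (by simp))]
  | [a, b] =>
    show gconv ['0', a, b] = gconv [a, b]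
    simp only [gconv, star2 a b (hd a (by simp)) (hd b (by simp))]
  | [a, b, c] => simp [padOf, gconv]

-- ---- slice facts ----

theorem slice_prefix (s : List Char) (k : Nat) (a b : Int) (h0 : 0 ≤ a) (hab : a ≤ b)
    (hbk : b ≤ (k : Int)) (hk : k ≤ s.length) :
    PySem.List.slice (s.take k) (some a) (some b) = PySem.List.slice s (some a) (some b) := by
  simp only [PySem.List.slice, PySem.List.clampIdx, if_neg (by omega : ¬ a < 0),
    if_neg (by omega : ¬ b < 0), List.length_take]
  have hmin : min k s.length = k := by omega
  rw [hmin]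
  have ha : min a.toNat k = a.toNat := by omega
  have hb : min b.toNat k = b.toNat := by omega
  have ha' : min a.toNat s.length = a.toNat := by omega
  have hb' : min b.toNat s.length = b.toNat := by omega
  rw [ha, hb, ha', hb', List.drop_take, List.take_take]
  congr 1
  omega

theorem slice_full (ds : List Char) : PySem.List.slice ds (some 0) (some (ds.length : Int)) = ds := by
  simp only [PySem.List.slice, PySem.List.clampIdx, if_neg (by omega : ¬ (0:Int) < 0),
    if_neg (by omega : ¬ ((ds.length : Int)) < 0), Int.toNat_natCast, min_self, Int.toNat_zero]
  exact List.take_of_length_le (by simp)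

theorem slice_drop (ds : List Char) (a : Nat) (ha : a ≤ ds.length) :
    PySem.List.slice ds (some (a : Int)) (some (ds.length : Int)) = ds.drop a := by
  simp only [PySem.List.slice, PySem.List.clampIdx, if_neg (by omega : ¬ (a:Int) < 0),
    if_neg (by omega : ¬ ((ds.length:Int)) < 0), Nat.min_eq_left ha, Int.toNat_natCast,
    min_self]
  exact List.take_of_length_le (by simp)

-- ---- B's loop equals the reference ----

theorem bChunks_acc (s : List Char) : ∀ i, ∀ parts, bChunks s i parts = parts ++ bChunks s i [] := by
  intro i
  induction i using Nat.strong_induction_on with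
  | _ i ih =>
    intro parts
    by_cases h : i > 0
    · conv_lhs => rw [bChunks]
      conv_rhs => rw [bChunks]
      rw [if_pos h, if_pos h, ih (i - 3) (by omega), ih (i - 3) (by omega) ([] ++ _)]
      simp
    · conv_lhs => rw [bChunks]
      conv_rhs => rw [bChunks]
      rw [if_neg h, if_neg h]
      simp

theorem bChunks_take (s : List Char) (k : Nat) (hk : k ≤ s.length) :
    ∀ i, i ≤ k → ∀ parts, bChunks s i parts = bChunks (s.take k) i parts := by
  intro i
  induction i using Nat.strong_induction_on with
  | _ i ih =>
    intro hik parts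
    by_cases h : i > 0
    · conv_lhs => rw [bChunks]
      conv_rhs => rw [bChunks]
      rw [if_pos h, if_pos h,
        slice_prefix s k (max 0 ((i:Int) - 3)) i (by omega) (by omega) (by omega) hk,
        ih (i - 3) (by omega) (by omega)]
    · conv_lhs => rw [bChunks]
      conv_rhs => rw [bChunks]
      rw [if_neg h, if_neg h]

theorem B_eq_R (ds : List Char) : (bChunks ds ds.length []).reverse = Rlist ds := by
  induction hn : ds.length using Nat.strong_induction_on generalizing ds with
  | _ n ih =>
    subst hn
    by_cases hnil : ds = []
    · subst hnil
      conv_lhs => rw [bChunks]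
      rw [Rlist]
      simp
    · have hpos : 0 < ds.length := List.length_pos_iff.mpr hnil
      conv_lhs => rw [bChunks]
      rw [if_pos hpos, bChunks_acc, Rlist, if_neg hnil]
      have hmax : max 0 ((ds.length : Int) - 3) = ((ds.length - 3 : Nat) : Int) := by omega
      rw [hmax, slice_drop ds (ds.length - 3) (by omega)]
      have htk : (ds.take (ds.length - 3)).length = ds.length - 3 := by simp
      rw [bChunks_take ds (ds.length - 3) (by omega) (ds.length - 3) le_rfl]
      have hih := ih (ds.length - 3) (by omega) (ds.take (ds.length - 3)) htk
      simp only [List.nil_append, List.reverse_append, List.reverse_cons, List.reverse_nil]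
      rw [hih]
      simp [gconv]

-- ---- A's loop equals the reference ----

theorem padOf_lt (n : Nat) : padOf n < 3 := by unfold padOf; split <;> omega
theorem padOf_mod (n : Nat) : (n + padOf n) % 3 = 0 := by unfold padOf; split <;> omega

theorem Afold_eq (ds : List Char) :
    ((PySem.List.pyRange 0 (PySem.List.len (pads ds)) 3).foldl
      (fun x i => x ++ [pyChr (pyIntD (PySem.List.slice (pads ds) (some i) (some (i + 3))))]) [])
      = AfoldR (pads ds) ((ds.length + padOf ds.length) / 3) := by
  have h3 : (0:Int) < 3 := by norm_num
  rw [PySem.List.pyRange_of_pos 0 _ h3]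
  have hlen : PySem.List.len (pads ds) = ((ds.length + padOf ds.length : Nat) : Int) := by
    simp [PySem.List.len_eq, pads]; omega
  rw [hlen]
  have hmod := padOf_mod ds.length
  have hk : (if (0:Int) < ((ds.length + padOf ds.length : Nat) : Int) then
      ((((ds.length + padOf ds.length : Nat) : Int) - 0 + 3 - 1) / 3).toNat else 0)
      = (ds.length + padOf ds.length) / 3 := by
    split <;> omega
  rw [hk]
  rfl

theorem AfoldR_succ (t : List Char) (k : Nat) :
    AfoldR t (k + 1) = AfoldR t k ++
      [pyChr (pyIntD (PySem.List.slice t (some (0 + 3 * (k : Int))) (some (0 + 3 * (k : Int) + 3))))] := by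
  unfold AfoldR
  rw [List.range_succ, List.map_append, List.foldl_append]
  rfl

theorem AfoldR_take (t : List Char) (k : Nat) (h : 3 * k ≤ t.length) :
    AfoldR (t.take (3 * k)) k = AfoldR t k := by
  unfold AfoldR
  apply PySem.List.foldl_congr_mem
  intro acc x hx
  obtain ⟨j, hj, rfl⟩ := List.mem_map.mp hx
  rw [List.mem_range] at hj
  rw [slice_prefix t (3 * k) _ _ (by omega) (by omega) (by push_cast; omega) (by omega)]

theorem Rlist_nil : Rlist [] = [] := by rw [Rlist]; rfl

theorem Rlist_cons (ds : List Char) (h : ds ≠ []) :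
    Rlist ds = Rlist (ds.take (ds.length - 3)) ++ [gconv (ds.drop (ds.length - 3))] := by
  rw [Rlist, if_neg h]

theorem AfoldR_eq_R (ds : List Char) (h1 : ds ≠ []) (hd : ∀ c ∈ ds, c ∈ DIG) :
    AfoldR (pads ds) ((ds.length + padOf ds.length) / 3) = Rlist ds := by
  induction hn : ds.length using Nat.strong_induction_on generalizing ds with
  | _ n ih =>
    subst hn
    have hn0 : 0 < ds.length := List.length_pos_iff.mpr h1
    have hp := padOf_lt ds.length
    have hmod := padOf_mod ds.length
    have hlent : (pads ds).length = ds.length + padOf ds.length := by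
      simp [pads]; omega
    by_cases h3 : ds.length ≤ 3
    · have hsum : ds.length + padOf ds.length = 3 := by omega
      have hk1 : (ds.length + padOf ds.length) / 3 = 1 := by omega
      rw [hk1, show (1 : Nat) = 0 + 1 from rfl, AfoldR_succ]
      have e1 : (0 + 3 * ((0 : Nat) : Int)) = (0 : Int) := by norm_num
      rw [e1]
      have e2 : ((0 : Int) + 3) = ((pads ds).length : Int) := by
        rw [hlent, hsum]; norm_num
      rw [e2, slice_full (pads ds), Rlist_cons ds h1, show ds.length - 3 = 0 from by omega]
      simp only [List.take_zero, List.drop_zero, Rlist_nil]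
      unfold AfoldR
      simp only [List.range_zero, List.map_nil, List.foldl_nil, List.nil_append]
      exact congrArg (fun c => [c]) (g_pad ds h1 hd h3)
    · have h3k : 3 * ((ds.length + padOf ds.length) / 3) = ds.length + padOf ds.length := by
        omega
      rw [show (ds.length + padOf ds.length) / 3
            = ((ds.length + padOf ds.length) / 3 - 1) + 1 from by omega, AfoldR_succ]
      have e1 : (0 + 3 * ((((ds.length + padOf ds.length) / 3 - 1 : Nat)) : Int))
          = (((ds.length + padOf ds.length - 3 : Nat)) : Int) := by
        omega
      rw [e1]
      have e2 : ((((ds.length + padOf ds.length - 3 : Nat)) : Int) + 3)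
          = ((pads ds).length : Int) := by
        rw [hlent]; push_cast; omega
      rw [e2, slice_drop (pads ds) (ds.length + padOf ds.length - 3) (by omega)]
      have hdrop : (pads ds).drop (ds.length + padOf ds.length - 3)
          = ds.drop (ds.length - 3) := by
        simp only [pads, List.drop_append, List.length_replicate]
        rw [List.drop_eq_nil_of_le (by simp only [List.length_replicate]; omega)]
        simp only [List.nil_append]
        congr 1
        omega
      rw [hdrop]
      have hpe : padOf (ds.length - 3) = padOf ds.length := by
        unfold padOf
        rw [show (ds.length - 3) % 3 = ds.length % 3 from by omega]
      have harith : padOf ds.length ≤ 3 * ((ds.length + padOf ds.length) / 3 - 1) := by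
        omega
      have hrep : List.take (3 * ((ds.length + padOf ds.length) / 3 - 1))
            (List.replicate (padOf ds.length) '0')
          = List.replicate (padOf ds.length) '0' :=
        List.take_of_length_le (by simp only [List.length_replicate]; exact harith)
      have htake : pads (ds.take (ds.length - 3))
          = (pads ds).take (3 * ((ds.length + padOf ds.length) / 3 - 1)) := by
        simp only [pads, List.take_append, List.length_replicate, List.length_take,
          show min (ds.length - 3) ds.length = ds.length - 3 from by omega, hpe, hrep]
        congr 2
        omega
      have hne' : ds.take (ds.length - 3) ≠ [] := by
        intro hc
        have := congrArg List.length hc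
        simp at this
        omega
      have ihh := ih (ds.length - 3) (by omega) (ds.take (ds.length - 3)) hne'
        (fun c hc => hd c ((List.take_sublist _ _).subset hc))
        (by rw [List.length_take]; omega)
      rw [hpe, show (ds.length - 3 + padOf ds.length) / 3
            = (ds.length + padOf ds.length) / 3 - 1 from by omega, htake] at ihh
      rw [← AfoldR_take (pads ds) ((ds.length + padOf ds.length) / 3 - 1) (by omega), ihh,
        Rlist_cons ds h1]
      rfl

-- ===== VERDICT (by name: the statement is the Claim_ definition above) =====
theorem int_to_str_spec : Claim_equal_int_to_str := by
  intro m _ hm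
  show int_to_str m = int_to_str_alt m
  show String.mk ((PySem.List.pyRange 0 (PySem.List.len (pads (PySem.Int.toChars m))) 3).foldl
      (fun x i => x ++ [pyChr (pyIntD (PySem.List.slice (pads (PySem.Int.toChars m)) (some i) (some (i + 3))))]) [])
    = String.mk (bChunks (PySem.Int.toChars m) (PySem.Int.toChars m).length []).reverse
  rw [Afold_eq, AfoldR_eq_R _ (toChars_ne_nil m hm) (toChars_mem m hm), ← B_eq_R]
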